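-- pv_equiv track=rewrite | github.com/arnabwahid/bookmark-organizer | bookmarks_organizer.py | domain_category
-- ===== SOURCE A (Python) =====
-- from typing import Dict, List, Optional, Tuple
--
-- SPECIAL_DOMAIN_CATEGORIES = {
--     "archive.org": "WebArchives",
--     "github.com": "github",
--     "news.ycombinator.com": "HN",
--     "ycombinator.com": "HN",
--     "goodreads.com": "goodreads",
-- }
--
-- SOCIAL_DOMAINS = {
--     "facebook.com": "Facebook",
--     "m.facebook.com": "Facebook",
--     "twitter.com": "Twitter",
--     "x.com": "Twitter",
--     "pinterest.com": "Pinterest",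
--     "reddit.com": "Reddit",
--     "instagram.com": "Instagram",
--     "linkedin.com": "LinkedIn",
--     "tiktok.com": "TikTok",
--     "snapchat.com": "Snapchat",
--     "threads.net": "Threads",
--     "discord.com": "Discord",
--     "discord.gg": "Discord",
--     "mastodon.social": "Mastodon",
--     "medium.com": "Medium",
--     "dev.to": "dev.to",
--     "hashnode.com": "Hashnode",
-- }
--
-- def domain_category(netloc: str) -> Optional[str]:
--     """Return category name for known domains, or None."""
--     host = (netloc or "").lower()
--     for dom, cat in SPECIAL_DOMAIN_CATEGORIES.items():
--         if host == dom or host.endswith("." + dom):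
--             return cat
--     for dom, cat in SOCIAL_DOMAINS.items():
--         if host == dom or host.endswith("." + dom):
--             return cat
--     return None
-- ===== SOURCE B (Python) =====
-- _CATEGORY_BY_DOMAIN = {
--     "archive.org": "WebArchives",
--     "github.com": "github",
--     "news.ycombinator.com": "HN",
--     "ycombinator.com": "HN",
--     "goodreads.com": "goodreads",
--     "facebook.com": "Facebook",
--     "m.facebook.com": "Facebook",
--     "twitter.com": "Twitter",
--     "x.com": "Twitter",
--     "pinterest.com": "Pinterest",
--     "reddit.com": "Reddit",
--     "instagram.com": "Instagram",
--     "linkedin.com": "LinkedIn",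
--     "tiktok.com": "TikTok",
--     "snapchat.com": "Snapchat",
--     "threads.net": "Threads",
--     "discord.com": "Discord",
--     "discord.gg": "Discord",
--     "mastodon.social": "Mastodon",
--     "medium.com": "Medium",
--     "dev.to": "dev.to",
--     "hashnode.com": "Hashnode",
-- }
--
--
-- def _suffixes_after_dots(host):
--     """Suffixes of host that start right after a '.', longest first."""
--     tails = []
--     for i, ch in enumerate(host):
--         if ch == ".":
--             tails.append(host[i + 1:])
--     return tails
--
--
-- def domain_category(netloc):
--     """Return category name for known domains, or None."""
--     host = (netloc or "").lower()
--     for cand in [host] + _suffixes_after_dots(host):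
--         cat = _CATEGORY_BY_DOMAIN.get(cand)
--         if cat is not None:
--             return cat
--     return None
-- ===== Notes on version B (the rewrite author's own statement) =====
-- stated objective: idiomatic
-- what changed: Instead of scanning the two category tables and running an equality/endswith test per table entry, B builds one merged domain-to-category dict and probes it with the host's own dot-suffix candidates (full host, then each suffix after a dot), longest first, returning the first hit.
import Mathlib
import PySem

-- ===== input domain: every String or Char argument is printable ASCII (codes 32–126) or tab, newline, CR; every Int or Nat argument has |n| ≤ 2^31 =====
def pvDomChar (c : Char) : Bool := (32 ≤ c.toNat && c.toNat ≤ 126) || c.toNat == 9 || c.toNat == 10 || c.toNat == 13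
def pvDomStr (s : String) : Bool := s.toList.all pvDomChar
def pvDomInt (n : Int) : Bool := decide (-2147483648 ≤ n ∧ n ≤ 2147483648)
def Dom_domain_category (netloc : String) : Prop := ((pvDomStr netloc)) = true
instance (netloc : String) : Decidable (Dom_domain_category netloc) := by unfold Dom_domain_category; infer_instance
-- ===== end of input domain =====

-- B replaces A's scan over the two category tables (one suffix test per table entry) with one merged
-- domain→category dict probed at the host's own dot-suffix candidates, longest first (idiomatic rewrite; same result).

-- ===== PORT A =====
def pvSpecial : List (String × String) :=
  [("archive.org", "WebArchives"), ("github.com", "github"),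
   ("news.ycombinator.com", "HN"), ("ycombinator.com", "HN"), ("goodreads.com", "goodreads")]

def pvSocial : List (String × String) :=
  [("facebook.com", "Facebook"), ("m.facebook.com", "Facebook"), ("twitter.com", "Twitter"),
   ("x.com", "Twitter"), ("pinterest.com", "Pinterest"), ("reddit.com", "Reddit"),
   ("instagram.com", "Instagram"), ("linkedin.com", "LinkedIn"), ("tiktok.com", "TikTok"),
   ("snapchat.com", "Snapchat"), ("threads.net", "Threads"), ("discord.com", "Discord"),
   ("discord.gg", "Discord"), ("mastodon.social", "Mastodon"), ("medium.com", "Medium"),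
   ("dev.to", "dev.to"), ("hashnode.com", "Hashnode")]

-- A's 'for dom, cat in table.items(): if host == dom or host.endswith("." + dom): return cat'
def pvScan (host : List Char) : List (String × String) → Option String
  | [] => none
  | (dom, cat) :: rest =>
    if host = dom.toList ∨ PySem.Chars.endswith host ('.' :: dom.toList) = true then some cat
    else pvScan host rest

def domain_category (netloc : String) : Option String :=
  let host := (PySem.Str.lower (if netloc = "" then "" else netloc)).toList
  match pvScan host pvSpecial with
  | some cat => some cat
  | none => pvScan host pvSocial

-- ===== PORT B =====
def pvMergedPairs : List (String × String) :=
  [("archive.org", "WebArchives"), ("github.com", "github"),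
   ("news.ycombinator.com", "HN"), ("ycombinator.com", "HN"), ("goodreads.com", "goodreads"),
   ("facebook.com", "Facebook"), ("m.facebook.com", "Facebook"), ("twitter.com", "Twitter"),
   ("x.com", "Twitter"), ("pinterest.com", "Pinterest"), ("reddit.com", "Reddit"),
   ("instagram.com", "Instagram"), ("linkedin.com", "LinkedIn"), ("tiktok.com", "TikTok"),
   ("snapchat.com", "Snapchat"), ("threads.net", "Threads"), ("discord.com", "Discord"),
   ("discord.gg", "Discord"), ("mastodon.social", "Mastodon"), ("medium.com", "Medium"),
   ("dev.to", "dev.to"), ("hashnode.com", "Hashnode")]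

def pvMergedDict : PySem.Dict String String := PySem.Dict.ofList pvMergedPairs

-- Source B's _suffixes_after_dots: 'for i, ch in enumerate(host): if ch == ".": tails.append(host[i+1:])'
def pvSuffixesAfterDots (host : List Char) : List (List Char) :=
  (PySem.List.enumerate host 0).foldl
    (fun tails p =>
      if p.2 == '.' then tails ++ [PySem.List.slice host (some (p.1 + 1)) none] else tails) []

-- Source B's 'for cand in …: cat = dict.get(cand); if cat is not None: return cat'
def pvFirstHit : List (List Char) → Option String
  | [] => none
  | cand :: rest =>
    match pvMergedDict.get? (String.ofList cand) with
    | some cat => some cat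
    | none => pvFirstHit rest

def domain_category_alt (netloc : String) : Option String :=
  let host := (PySem.Str.lower (if netloc = "" then "" else netloc)).toList
  pvFirstHit (host :: pvSuffixesAfterDots host)

-- ===== PRECONDITION & SPEC =====
def Spec_domain_category (netloc : String) (out : Option String) : Prop := out = domain_category_alt netloc
instance (netloc : String) (out : Option String) : Decidable (Spec_domain_category netloc out) := by unfold Spec_domain_category; infer_instance

-- ===== CLAIM (what is proved, stated in full; the proofs are below) =====
def Claim_equal_domain_category : Prop := ∀ (netloc : String), Dom_domain_category netloc → Spec_domain_category netloc (domain_category netloc)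

-- ===== LEMMAS AND PROOFS =====

-- A's match condition for one table entry
def pvCond (host : List Char) (dom : String) : Prop :=
  host = dom.toList ∨ PySem.Chars.endswith host ('.' :: dom.toList) = true

-- the merged table is the concatenation of A's two tables, as a plain pair list
lemma pv_merged_eq : pvMergedDict = PySem.Dict.mk (pvSpecial ++ pvSocial) := by decide

-- no two table entries with different categories are equal or dot-suffix-related
lemma pv_table_consistent :
    ∀ e1 ∈ pvSpecial ++ pvSocial, ∀ e2 ∈ pvSpecial ++ pvSocial,
      (e1.1 = e2.1 ∨ ('.' :: e2.1.toList) <:+ e1.1.toList) → e1.2 = e2.2 := by decide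

lemma pv_scan_append (host : List Char) (t1 t2 : List (String × String)) :
    pvScan host (t1 ++ t2) =
      (match pvScan host t1 with | some c => some c | none => pvScan host t2) := by
  induction t1 with
  | nil => simp [pvScan]
  | cons e rest ih =>
    obtain ⟨dom, cat⟩ := e
    by_cases h : pvCond host dom <;> simp [pvScan, pvCond] at h ⊢ <;> simp [h, ih]

lemma pv_scan_some {host : List Char} {t : List (String × String)} {cat : String}
    (h : pvScan host t = some cat) : ∃ e ∈ t, pvCond host e.1 ∧ e.2 = cat := by
  induction t with
  | nil => simp [pvScan] at h
  | cons e rest ih =>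
    obtain ⟨dom, c⟩ := e
    rw [pvScan] at h
    split_ifs at h with hc
    · exact ⟨(dom, c), by simp, hc, Option.some.inj h⟩
    · obtain ⟨e', he', hc', hcat⟩ := ih h
      exact ⟨e', List.mem_cons_of_mem _ he', hc', hcat⟩

lemma pv_scan_none_iff {host : List Char} {t : List (String × String)} :
    pvScan host t = none ↔ ∀ e ∈ t, ¬ pvCond host e.1 := by
  induction t with
  | nil => simp [pvScan]
  | cons e rest ih =>
    obtain ⟨dom, c⟩ := e
    rw [pvScan]
    split_ifs with hc
    · constructor
      · intro h; exact absurd h (by simp)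
      · intro h; exact absurd hc (h (dom, c) (by simp))
    · rw [ih]
      constructor
      · intro h e he
        rcases List.mem_cons.mp he with rfl | he'
        · exact hc
        · exact h e he'
      · intro h e he; exact h e (List.mem_cons_of_mem _ he)

lemma pv_firstHit_some {cs : List (List Char)} {cat : String}
    (h : pvFirstHit cs = some cat) :
    ∃ c ∈ cs, pvMergedDict.get? (String.ofList c) = some cat := by
  induction cs with
  | nil => simp [pvFirstHit] at h
  | cons c rest ih =>
    rw [pvFirstHit] at h
    cases hg : pvMergedDict.get? (String.ofList c) with
    | some v => rw [hg] at h; exact ⟨c, by simp, by simp [hg, ← h]⟩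
    | none =>
      rw [hg] at h
      obtain ⟨c', hc', hg'⟩ := ih h
      exact ⟨c', by simp [hc'], hg'⟩

lemma pv_firstHit_none_iff {cs : List (List Char)} :
    pvFirstHit cs = none ↔ ∀ c ∈ cs, pvMergedDict.get? (String.ofList c) = none := by
  induction cs with
  | nil => simp [pvFirstHit]
  | cons c rest ih =>
    rw [pvFirstHit]
    cases hg : pvMergedDict.get? (String.ofList c) with
    | some v => simp [hg]
    | none => simp [hg, ih]

lemma pv_dict_get?_mem {l : List (String × String)} {k : String} {v : String}
    (h : (PySem.Dict.mk l).get? k = some v) : (k, v) ∈ l := by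
  induction l with
  | nil => simp [PySem.Dict.get?] at h
  | cons e rest ih =>
    obtain ⟨k0, v0⟩ := e
    rw [PySem.Dict.get?_mk_cons] at h
    by_cases hk : k0 = k
    · simp [hk] at h; simp [hk, h]
    · simp [hk] at h; simp [ih h]

lemma pv_mem_dict_get?_ne_none {l : List (String × String)} {k : String} {v : String}
    (h : (k, v) ∈ l) : (PySem.Dict.mk l).get? k ≠ none := by
  induction l with
  | nil => simp at h
  | cons e rest ih =>
    obtain ⟨k0, v0⟩ := e
    rw [PySem.Dict.get?_mk_cons]
    by_cases hk : k0 = k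
    · simp [hk]
    · simp [hk]
      rcases List.mem_cons.mp h with h1 | h1
      · exact absurd (congrArg Prod.fst h1).symm hk
      · exact ih h1

lemma pv_dot_drop_iff (host d : List Char) :
    (∃ k : Nat, ∃ _ : k < host.length, host[k] = '.' ∧ d = host.drop (k + 1)) ↔
      ('.' :: d) <:+ host := by
  induction host generalizing d with
  | nil => simp
  | cons c cs ih =>
    rw [List.suffix_cons_iff]
    constructor
    · rintro ⟨k, hk, hdot, hd⟩
      cases k with
      | zero => left; simp_all
      | succ j =>
        right
        exact (ih d).mp ⟨j, by simpa using hk, by simpa using hdot, by simpa using hd⟩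
    · rintro (h | h)
      · obtain ⟨h1, h2⟩ := List.cons_eq_cons.mp h
        exact ⟨0, by simp, by simp [h1.symm], by simp [h2]⟩
      · obtain ⟨j, hj, hdot, hd⟩ := (ih d).mpr h
        exact ⟨j + 1, by simpa using hj, by simpa using hdot, by simpa using hd⟩

lemma pv_suffix_mem_iff (host d : List Char) :
    d ∈ pvSuffixesAfterDots host ↔ ('.' :: d) <:+ host := by
  rw [pvSuffixesAfterDots, PySem.List.foldl_append_if, ← pv_dot_drop_iff]
  simp only [List.nil_append, List.mem_map, List.mem_filter,
    PySem.List.mem_enumerate_iff]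
  constructor
  · rintro ⟨p, ⟨⟨k, hk, rfl⟩, hdot⟩, rfl⟩
    refine ⟨k, hk, by simpa using hdot, ?_⟩
    have : ((0 : Int) + k) + 1 = ((k + 1 : Nat) : Int) := by push_cast; ring
    rw [this, PySem.List.slice_from_natCast]
  · rintro ⟨k, hk, hdot, rfl⟩
    refine ⟨((0 : Int) + k, host[k]), ⟨⟨k, hk, rfl⟩, by simpa using hdot⟩, ?_⟩
    have : ((0 : Int) + k) + 1 = ((k + 1 : Nat) : Int) := by push_cast; ring
    rw [this, PySem.List.slice_from_natCast]

lemma pv_cond_iff_cands (host : List Char) (dom : String) :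
    pvCond host dom ↔ dom.toList ∈ host :: pvSuffixesAfterDots host := by
  rw [List.mem_cons, pv_suffix_mem_iff]
  unfold pvCond
  rw [PySem.Chars.endswith_iff, eq_comm]

-- any two candidates are equal or dot-suffix-related
lemma pv_cands_comparable {host s1 s2 : List Char}
    (h1 : s1 ∈ host :: pvSuffixesAfterDots host) (h2 : s2 ∈ host :: pvSuffixesAfterDots host) :
    s1 = s2 ∨ ('.' :: s2) <:+ s1 ∨ ('.' :: s1) <:+ s2 := by
  simp only [List.mem_cons, pv_suffix_mem_iff] at h1 h2
  rcases h1 with h1 | h1 <;> rcases h2 with h2 | h2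
  · left; rw [h1, h2]
  · right; left; rw [h1]; exact h2
  · right; right; rw [h2]; exact h1
  · rcases List.suffix_or_suffix_of_suffix h1 h2 with h | h
    · rcases List.suffix_cons_iff.mp h with h' | h'
      · left; exact (List.cons_eq_cons.mp h').2
      · right; right; exact h'
    · rcases List.suffix_cons_iff.mp h with h' | h'
      · left; exact ((List.cons_eq_cons.mp h').2).symm
      · right; left; exact h'

-- two table entries both matching the same host carry the same category
lemma pv_matching_same_cat {host : List Char} {e1 e2 : String × String}
    (m1 : e1 ∈ pvSpecial ++ pvSocial) (m2 : e2 ∈ pvSpecial ++ pvSocial)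
    (c1 : pvCond host e1.1) (c2 : pvCond host e2.1) : e1.2 = e2.2 := by
  have h1 := (pv_cond_iff_cands host e1.1).mp c1
  have h2 := (pv_cond_iff_cands host e2.1).mp c2
  rcases pv_cands_comparable h1 h2 with h | h | h
  · have : e1.1 = e2.1 := by
      have := congrArg String.ofList h
      rwa [String.ofList_toList, String.ofList_toList] at this
    exact pv_table_consistent e1 m1 e2 m2 (Or.inl this)
  · exact pv_table_consistent e1 m1 e2 m2 (Or.inr h)
  · exact (pv_table_consistent e2 m2 e1 m1 (Or.inr h)).symm

lemma pv_main (host : List Char) :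
    pvScan host (pvSpecial ++ pvSocial) = pvFirstHit (host :: pvSuffixesAfterDots host) := by
  cases hA : pvScan host (pvSpecial ++ pvSocial) with
  | none =>
    cases hB : pvFirstHit (host :: pvSuffixesAfterDots host) with
    | none => rfl
    | some catB =>
      obtain ⟨c, hc, hg⟩ := pv_firstHit_some hB
      rw [pv_merged_eq] at hg
      have hmem := pv_dict_get?_mem hg
      have hcond : pvCond host (String.ofList c) := by
        rw [pv_cond_iff_cands, String.toList_ofList]; exact hc
      exact absurd hcond (pv_scan_none_iff.mp hA _ hmem)
  | some catA =>
    obtain ⟨e1, m1, hc1, hcat1⟩ := pv_scan_some hA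
    cases hB : pvFirstHit (host :: pvSuffixesAfterDots host) with
    | none =>
      have hcand := (pv_cond_iff_cands host e1.1).mp hc1
      have hnone := pv_firstHit_none_iff.mp hB _ hcand
      rw [String.ofList_toList, pv_merged_eq] at hnone
      exact absurd hnone (pv_mem_dict_get?_ne_none (by simpa using m1))
    | some catB =>
      obtain ⟨c, hc, hg⟩ := pv_firstHit_some hB
      rw [pv_merged_eq] at hg
      have m2 := pv_dict_get?_mem hg
      have hc2 : pvCond host (String.ofList c) := by
        rw [pv_cond_iff_cands, String.toList_ofList]; exact hc
      rw [← hcat1]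
      exact congrArg some (pv_matching_same_cat m1 m2 hc1 hc2)

-- ===== VERDICT (by name: the statement is the Claim_ definition above) =====
theorem domain_category_spec : Claim_equal_domain_category := by
  intro netloc _
  unfold Spec_domain_category domain_category domain_category_alt
  rw [← pv_main, pv_scan_append]
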